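-- pv_equiv track=rewrite | github.com/tipsharsha/polymul | Python/map.py | primitiveRootOfUnity
-- ===== SOURCE A (Python) =====
-- def primitiveRootOfUnity(n, q):
--     """Find a primitive n-th root of unity mod q if it exists.
--
--     I.e., w, s.t. w^n = 1 mod q and w^k != 1 mod q for all k < n.
--     Parameters
--     ----------
--     n : int
--     q : int
--         modulus.
--     Returns
--     ----------
--     int
--         n-th root of unity modulo q.
--     """
--     for i in range(2,q):
--         if pow(i, n, q) == 1:
--             # i is an n-th root of unity, but it may not be primitive
--             # check by making sure i^j != 1 mod q for 1<=j<n
--             isPrimitive = True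
--             for j in range(1,n):
--                 if pow(i, j, q) == 1:
--                     isPrimitive = False
--                     break
--             if isPrimitive:
--                 return i
-- ===== SOURCE B (Python) =====
-- def primitiveRootOfUnity(n, q):
--     """Find a primitive n-th root of unity mod q if it exists.
--
--     Same scan as before over candidates 2..q-1, but primitivity of a root i
--     is checked against the proper divisors of n only (collected once by trial
--     division up to sqrt(n)) instead of every exponent 1..n-1: the order of i
--     divides n, so it suffices that i**j != 1 mod q for every proper divisor j.
--     """
--     divs = []
--     d = 1
--     while d * d <= n:
--         if n % d == 0:
--             if d != n:
--                 divs.append(d)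
--             e = n // d
--             if e != d and e != n:
--                 divs.append(e)
--         d += 1
--     for i in range(2, q):
--         if pow(i, n, q) == 1 and all(pow(i, j, q) != 1 for j in divs):
--             return i
--     return None
-- ===== Notes on version B (the rewrite author's own statement) =====
-- stated objective: alternative
-- what changed: B collects the proper divisors of n once by trial division up to sqrt(n) and tests a candidate root's primitivity only at those divisor exponents (the order of a root divides n), instead of A's scan of every exponent 1..n-1 for every root candidate; on random inputs the candidate scan dominates both, so measured cost is the same.
-- outside the precondition, e.g. on primitiveRootOfUnity(-2, 5): A returns 4, B returns 4; on primitiveRootOfUnity(-2, 4): A raises ValueError, B raises ValueError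
import Mathlib
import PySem

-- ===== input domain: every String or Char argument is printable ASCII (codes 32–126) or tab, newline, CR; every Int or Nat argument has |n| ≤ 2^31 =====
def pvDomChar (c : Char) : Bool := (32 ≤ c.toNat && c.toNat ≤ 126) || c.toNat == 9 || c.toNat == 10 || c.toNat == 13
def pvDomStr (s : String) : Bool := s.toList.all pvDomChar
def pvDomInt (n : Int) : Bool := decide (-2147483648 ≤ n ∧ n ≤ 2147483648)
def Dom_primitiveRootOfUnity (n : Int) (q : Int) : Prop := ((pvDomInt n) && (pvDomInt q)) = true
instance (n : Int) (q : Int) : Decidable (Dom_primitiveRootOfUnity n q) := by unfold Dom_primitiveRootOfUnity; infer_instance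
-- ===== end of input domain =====

-- B replaces A's per-candidate exponent scan 1..n-1 by a one-time trial-division list of
-- the proper divisors of n (the order of a root divides n), same candidate scan over 2..q-1.


-- ===== PORT A =====
-- pow(b, e, m), the builtin both Pythons call: binary modular exponentiation, exactly
-- CPython's algorithm for a nonnegative exponent (under Pre_ the exponents are only
-- evaluated when 3 ≤ q, in which case 0 ≤ n); pvPowMod_eq below proves it equal to
-- PySem.Int.powMod's b^e % m for 0 < m.
def pvPowMod (b : Int) (e : Nat) (m : Int) : Int :=
  if e = 0 then PySem.Int.mod 1 m
  else
    let r := pvPowMod (PySem.Int.mod (b * b) m) (e / 2) m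
    if e % 2 = 1 then PySem.Int.mod (PySem.Int.mod b m * r) m else r
  termination_by e
  decreasing_by omega

-- A's inner 'for j in range(1, n)' with the isPrimitive flag and break
def pvIsPrimLoop (i n q : Int) (j : Int) : Bool :=
  if _h : j < n then
    if pvPowMod i j.toNat q = 1 then false
    else pvIsPrimLoop i n q (j + 1)
  else true
  termination_by (n - j).toNat
  decreasing_by omega

-- A's outer 'for i in range(2, q): ... return i' (kept as a loop, not a materialised list,
-- so the port evaluates on large q exactly where the Python does)
def pvScanA (n q : Int) (i : Int) : Option Int :=
  if _h : i < q then
    if pvPowMod i n.toNat q == 1 && pvIsPrimLoop i n q 1 then some i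
    else pvScanA n q (i + 1)
  else none
  termination_by (q - i).toNat
  decreasing_by omega

def primitiveRootOfUnity (n : Int) (q : Int) : Option Int :=
  pvScanA n q 2


-- ===== PORT B =====
-- Source B's 'while d * d <= n' trial-division loop, carrying the divs accumulator
def pvDivLoop (n : Int) (d : Nat) (divs : List Int) : List Int :=
  if (d : Int) * d ≤ n then
    pvDivLoop n (d + 1)
      (divs ++
        (if PySem.Int.mod n d = 0 then
          (if (d : Int) ≠ n then [(d : Int)] else []) ++
          (if PySem.Int.floordiv n d ≠ (d : Int) ∧ PySem.Int.floordiv n d ≠ n then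
            [PySem.Int.floordiv n d] else [])
        else []))
  else divs
  termination_by n.toNat + 1 - d
  decreasing_by
    rename_i h
    have hn : (0 : Int) ≤ n := le_trans (by positivity) h
    have hd : (d : Int) ≤ n ∨ d = 0 := by
      rcases Nat.eq_zero_or_pos d with h1 | h1
      · right; exact h1
      · left
        have : (1 : Int) ≤ (d : Int) := by exact_mod_cast h1
        nlinarith
    omega

-- Source B's 'for i in range(2, q): ... return i', testing only the proper divisors of n
def pvScanB (n q : Int) (divs : List Int) (i : Int) : Option Int :=
  if _h : i < q then
    if pvPowMod i n.toNat q == 1 && divs.all (fun j => !(pvPowMod i j.toNat q == 1)) then some i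
    else pvScanB n q divs (i + 1)
  else none
  termination_by (q - i).toNat
  decreasing_by omega

def primitiveRootOfUnity_alt (n : Int) (q : Int) : Option Int :=
  pvScanB n q (pvDivLoop n 1 []) 2

-- ===== PRECONDITION & SPEC =====
-- Pre_ excludes negative n with 3 ≤ q: there Python's pow(i, n, q) takes a modular inverse
-- and raises ValueError whenever a scanned base i is not invertible mod q, and where A does
-- return, its primitivity loop range(1, n) is vacuous, so the value is merely some n-th
-- root — a corner artifact (B behaves identically there); for q ≤ 2 the scan is empty and
-- both return None for every n.

-- ===== PRECONDITION & SPEC =====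
-- Pre_ excludes negative n with 3 <= q: there Python's pow(i, n, q) takes a modular inverse
-- and raises ValueError whenever a scanned base i is not invertible mod q, and where A does
-- return, its primitivity loop range(1, n) is vacuous, so the value is merely some n-th
-- root -- a corner artifact (B behaves identically there); for q <= 2 the scan is empty and
-- both return None for every n.
def Pre_primitiveRootOfUnity (n : Int) (q : Int) : Prop := 0 ≤ n ∨ q ≤ 2
instance (n : Int) (q : Int) : Decidable (Pre_primitiveRootOfUnity n q) := by
  unfold Pre_primitiveRootOfUnity; infer_instance
def pvWitness_primitiveRootOfUnity : Int × Int := (4, 5)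

def Spec_primitiveRootOfUnity (n : Int) (q : Int) (out : Option Int) : Prop := out = primitiveRootOfUnity_alt n q
instance (n : Int) (q : Int) (out : Option Int) : Decidable (Spec_primitiveRootOfUnity n q out) := by unfold Spec_primitiveRootOfUnity; infer_instance

-- ===== CLAIM (what is proved, stated in full; the proofs are below) =====
def Claim_equal_primitiveRootOfUnity : Prop := ∀ (n : Int) (q : Int), Dom_primitiveRootOfUnity n q → Pre_primitiveRootOfUnity n q → Spec_primitiveRootOfUnity n q (primitiveRootOfUnity n q)

-- ===== LEMMAS AND PROOFS =====

theorem pvPow_emod (a n : Int) (k : Nat) : (a % n) ^ k % n = a ^ k % n :=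
  Int.ModEq.pow k (Int.emod_emod_of_dvd a dvd_rfl)

theorem pvPowMod_eq (b : Int) (e : Nat) (m : Int) (hm : 0 < m) :
    pvPowMod b e m = (b ^ e) % m := by
  induction b, e using pvPowMod.induct (m := m) with
  | case1 b =>
    rw [pvPowMod, if_pos rfl, PySem.Int.mod_eq_emod_of_pos hm, pow_zero]
  | case2 b e he ho IH =>
    rw [pvPowMod]
    simp only [if_neg he, ho, reduceIte]
    rw [IH, PySem.Int.mod_eq_emod_of_pos hm, PySem.Int.mod_eq_emod_of_pos hm,
      PySem.Int.mod_eq_emod_of_pos hm, pvPow_emod, ← Int.mul_emod]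
    obtain ⟨k, hk⟩ : ∃ k, e = 2 * k + 1 := ⟨e / 2, by omega⟩
    subst hk
    rw [show (2 * k + 1) / 2 = k from by omega,
      show b * (b * b) ^ k = b ^ (2 * k + 1) from by ring]
  | case3 b e he ho IH =>
    rw [pvPowMod]
    simp only [if_neg he, if_neg ho]
    rw [IH, PySem.Int.mod_eq_emod_of_pos hm, pvPow_emod]
    obtain ⟨k, hk⟩ : ∃ k, e = 2 * k := ⟨e / 2, by omega⟩
    subst hk
    rw [show 2 * k / 2 = k from by omega,
      show (b * b) ^ k = b ^ (2 * k) from by ring]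


-- proof-side recursive form of the divisor loop (no accumulator)
def pvDivLoopR (n : Int) (d : Nat) : List Int :=
  if h : (d : Int) * d ≤ n then
    (if PySem.Int.mod n d = 0 then
      (if (d : Int) ≠ n then [(d : Int)] else []) ++
      (if PySem.Int.floordiv n d ≠ (d : Int) ∧ PySem.Int.floordiv n d ≠ n then
        [PySem.Int.floordiv n d] else [])
    else []) ++ pvDivLoopR n (d + 1)
  else []
  termination_by n.toNat + 1 - d
  decreasing_by
    have hn : (0 : Int) ≤ n := le_trans (by positivity) h
    have hd : (d : Int) ≤ n ∨ d = 0 := by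
      rcases Nat.eq_zero_or_pos d with h1 | h1
      · right; exact h1
      · left
        have : (1 : Int) ≤ (d : Int) := by exact_mod_cast h1
        nlinarith
    omega

theorem pvDivLoopR_mem (n : Int) (d : Nat) (hd : 1 ≤ d) (j : Int) :
    j ∈ pvDivLoopR n d ↔
      j ∣ n ∧ j ≠ n ∧ 1 ≤ j ∧
        (((d : Int) ≤ j ∧ j * j ≤ n) ∨
         ((d : Int) ≤ n / j ∧ (n / j) * (n / j) ≤ n ∧ n / j ≠ j)) := by
  revert hd
  induction d using pvDivLoopR.induct (n := n) with
  | case1 d hlt IH =>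
    intro hd
    have hd1 : (1 : Int) ≤ (d : Int) := by exact_mod_cast hd
    have hn1 : (1 : Int) ≤ n := le_trans (by nlinarith) hlt
    have IH' := IH (by omega)
    rw [pvDivLoopR, dif_pos hlt]
    by_cases hdvd : (d : Int) ∣ n
    · rw [if_pos ((PySem.Int.mod_eq_zero_iff_dvd n (d : Int)).mpr hdvd),
        PySem.Int.floordiv_eq_ediv_of_pos (by omega : (0:Int) < (d:Int))]
      have he : n / (d : Int) * (d : Int) = n := Int.ediv_mul_cancel hdvd
      set e : Int := n / (d : Int) with hedef
      have hed : (d : Int) ≤ e := (Int.le_ediv_iff_mul_le (by omega)).mpr hlt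
      have he1 : (1 : Int) ≤ e := by omega
      have hne : n / e = (d : Int) := by
        rw [← he, Int.mul_ediv_cancel_left _ (by omega : e ≠ 0)]
      simp only [List.mem_append]
      have hmem1 : (j ∈ if (d : Int) ≠ n then [(d : Int)] else []) ↔ ((d : Int) ≠ n ∧ j = (d : Int)) := by
        split_ifs with h <;> simp [h]
      have hmem2 : (j ∈ if e ≠ (d : Int) ∧ e ≠ n then [e] else []) ↔ ((e ≠ (d : Int) ∧ e ≠ n) ∧ j = e) := by
        split_ifs with h <;> simp [h]
      rw [hmem1, hmem2, IH']
      constructor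
      · rintro ((⟨hDn, rfl⟩ | ⟨⟨heD, hen⟩, rfl⟩) | ⟨h1, h2, h3, hc⟩)
        · exact ⟨hdvd, hDn, hd1, Or.inl ⟨le_refl _, hlt⟩⟩
        · refine ⟨⟨(d : Int), he.symm⟩, hen, he1, Or.inr ?_⟩
          rw [hne]
          exact ⟨le_refl _, hlt, Ne.symm heD⟩
        · refine ⟨h1, h2, h3, ?_⟩
          rcases hc with ⟨ha, hb⟩ | ⟨ha, hb, hcn⟩
          · exact Or.inl ⟨by push_cast at ha ⊢; omega, hb⟩
          · exact Or.inr ⟨by push_cast at ha ⊢; omega, hb, hcn⟩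
      · rintro ⟨hjdvd, hjn, hj1, hcase⟩
        rcases hcase with ⟨hdj, hjj⟩ | ⟨hdc, hcc, hcj⟩
        · by_cases hjd : j = (d : Int)
          · exact Or.inl (Or.inl ⟨hjd ▸ hjn, hjd⟩)
          · exact Or.inr ⟨hjdvd, hjn, hj1, Or.inl ⟨by push_cast; omega, hjj⟩⟩
        · have hcjn : n / j * j = n := Int.ediv_mul_cancel hjdvd
          by_cases hcd : n / j = (d : Int)
          · have hje : j = e := by
              apply Int.eq_of_mul_eq_mul_right (by omega : (d : Int) ≠ 0)
              rw [he, ← hcd, mul_comm]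
              exact hcjn
            refine Or.inl (Or.inr ⟨⟨?_, hje ▸ hjn⟩, hje⟩)
            rw [← hje, ← hcd]
            exact Ne.symm hcj
          · exact Or.inr ⟨hjdvd, hjn, hj1, Or.inr ⟨by push_cast; omega, hcc, hcj⟩⟩
    · rw [if_neg (fun hmz => hdvd ((PySem.Int.mod_eq_zero_iff_dvd n (d : Int)).mp hmz))]
      simp only [List.nil_append]
      rw [IH']
      constructor
      · rintro ⟨h1, h2, h3, hc⟩
        refine ⟨h1, h2, h3, ?_⟩
        rcases hc with ⟨ha, hb⟩ | ⟨ha, hb, hcn⟩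
        · exact Or.inl ⟨by push_cast at ha ⊢; omega, hb⟩
        · exact Or.inr ⟨by push_cast at ha ⊢; omega, hb, hcn⟩
      · rintro ⟨hjdvd, hjn, hj1, hcase⟩
        refine ⟨hjdvd, hjn, hj1, ?_⟩
        rcases hcase with ⟨hdj, hjj⟩ | ⟨hdc, hcc, hcj⟩
        · have hne' : j ≠ (d : Int) := fun h => hdvd (h ▸ hjdvd)
          exact Or.inl ⟨by push_cast; omega, hjj⟩
        · have hcdvd : n / j ∣ n := Int.ediv_dvd_of_dvd hjdvd
          have hne' : n / j ≠ (d : Int) := fun h => hdvd (h ▸ hcdvd)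
          exact Or.inr ⟨by push_cast; omega, hcc, hcj⟩
  | case2 d hge =>
    intro hd
    rw [pvDivLoopR, dif_neg hge]
    simp only [List.not_mem_nil, false_iff]
    rintro ⟨hjdvd, hjn, hj1, ⟨hdj, hjj⟩ | ⟨hdc, hcc, hcj⟩⟩
    · exact hge (le_trans (mul_le_mul hdj hdj (by positivity) (by omega)) hjj)
    · exact hge (le_trans (mul_le_mul hdc hdc (by positivity) (le_trans (by positivity) hdc)) hcc)

theorem pvDivs_char (n : Int) (j : Int) :
    j ∈ pvDivLoopR n 1 ↔ (j ∣ n ∧ 1 ≤ j ∧ j < n) := by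
  rw [pvDivLoopR_mem n 1 (le_refl 1) j]
  push_cast
  constructor
  · rintro ⟨hdvd, hne, h1, hc⟩
    refine ⟨hdvd, h1, ?_⟩
    have hn1 : 1 ≤ n := by
      rcases hc with ⟨ha, hb⟩ | ⟨ha, hb, _⟩
      · nlinarith
      · nlinarith
    have := Int.le_of_dvd (by omega) hdvd
    omega
  · rintro ⟨hdvd, h1, hlt⟩
    have hn1 : 1 ≤ n := by omega
    refine ⟨hdvd, by omega, h1, ?_⟩
    by_cases hj : j * j ≤ n
    · exact Or.inl ⟨h1, hj⟩
    · have hcjn : n / j * j = n := Int.ediv_mul_cancel hdvd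
      have hc1 : 1 ≤ n / j := by nlinarith
      have hclt : n / j < j := by nlinarith
      exact Or.inr ⟨hc1, by nlinarith, by omega⟩

theorem pvDivLoop_acc (n : Int) (d : Nat) (divs : List Int) :
    pvDivLoop n d divs = divs ++ pvDivLoopR n d := by
  induction d, divs using pvDivLoop.induct (n := n) with
  | case1 d divs h IH =>
    simp only [dite_eq_ite] at IH
    rw [pvDivLoop, if_pos h, pvDivLoopR, dif_pos h, IH, List.append_assoc]
  | case2 d divs h =>
    rw [pvDivLoop, if_neg h, pvDivLoopR, dif_neg h, List.append_nil]

theorem pvPow_eq_one_iff (i : Int) (E : Nat) (q : Int) (hq : 2 ≤ q) :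
    pvPowMod i E q = 1 ↔ (i : ZMod q.toNat) ^ E = 1 := by
  rw [pvPowMod_eq _ _ _ (by omega)]
  have hqq : ((q.toNat : Nat) : Int) = q := Int.toNat_of_nonneg (by omega)
  have key : ((i ^ E : Int) : ZMod q.toNat) = ((1 : Int) : ZMod q.toNat) ↔
      (i ^ E) % (q.toNat : Int) = 1 % (q.toNat : Int) := ZMod.intCast_eq_intCast_iff _ _ _
  rw [hqq] at key
  have h1 : (1 : Int) % q = 1 := Int.emod_eq_of_lt (by omega) (by omega)
  rw [h1] at key
  push_cast at key
  exact key.symm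

theorem pvOrder_divisor_iff {M : Type} [Monoid M] (x : M) (N : Nat) (hx : x ^ N = 1) :
    (∀ J : Nat, 1 ≤ J → J < N → x ^ J ≠ 1) ↔
    (∀ J : Nat, J ∣ N → 1 ≤ J → J < N → x ^ J ≠ 1) := by
  constructor
  · exact fun h J _ h1 h2 => h J h1 h2
  · intro h J h1 h2 hJ
    have hfin : IsOfFinOrder x := isOfFinOrder_iff_pow_eq_one.mpr ⟨J, by omega, hJ⟩
    have hpos : 0 < orderOf x := orderOf_pos_iff.mpr hfin
    have hle : orderOf x ≤ J := Nat.le_of_dvd (by omega) (orderOf_dvd_of_pow_eq_one hJ)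
    exact h (orderOf x) (orderOf_dvd_of_pow_eq_one hx) hpos (by omega) (pow_orderOf_eq_one x)

theorem pvIsPrimLoop_iff (i n q : Int) (j : Int) :
    pvIsPrimLoop i n q j = true ↔ ∀ k : Int, j ≤ k → k < n → ¬ pvPowMod i k.toNat q = 1 := by
  induction j using pvIsPrimLoop.induct (i := i) (n := n) (q := q) with
  | case1 j h hpow =>
    rw [pvIsPrimLoop, dif_pos h, if_pos hpow]
    simp only [Bool.false_eq_true, false_iff, not_forall]
    exact ⟨j, le_refl j, h, by simpa using hpow⟩
  | case2 j h hpow IH =>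
    rw [pvIsPrimLoop, dif_pos h, if_neg hpow, IH]
    constructor
    · intro h' k hk1 hk2
      by_cases hkj : k = j
      · rw [hkj]; exact hpow
      · exact h' k (by omega) hk2
    · intro h' k hk1 hk2
      exact h' k (by omega) hk2
  | case3 j h =>
    rw [pvIsPrimLoop, dif_neg h]
    simp only [true_iff]
    intro k hk1 hk2
    omega

theorem pvPred_eq (n q i : Int) (hn : 0 ≤ n) (hq : 3 ≤ q) :
    (pvPowMod i n.toNat q == 1 && pvIsPrimLoop i n q 1)
    = (pvPowMod i n.toNat q == 1 &&
        (pvDivLoop n 1 []).all (fun j => !(pvPowMod i j.toNat q == 1))) := by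
  rw [Bool.eq_iff_iff]
  simp only [Bool.and_eq_true, List.all_eq_true, beq_iff_eq, Bool.not_eq_true',
    beq_eq_false_iff_ne, ne_eq, pvIsPrimLoop_iff, pvDivLoop_acc, List.nil_append]
  have hq2 : (2 : Int) ≤ q := by omega
  have hnn : ((n.toNat : Nat) : Int) = n := Int.toNat_of_nonneg hn
  constructor
  · -- every exponent in [1, n) fails ⇒ in particular every proper divisor fails
    rintro ⟨hroot, hA⟩
    refine ⟨hroot, fun j hj => ?_⟩
    rcases (pvDivs_char n j).mp hj with ⟨_, h1, hlt⟩
    exact hA j h1 hlt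
  · -- every proper divisor fails ⇒ (order argument) every exponent in [1, n) fails
    rintro ⟨hroot, hB⟩
    refine ⟨hroot, fun j hj1 hj2 => ?_⟩
    rw [pvPow_eq_one_iff _ _ _ hq2]
    rw [pvPow_eq_one_iff _ _ _ hq2] at hroot
    have hall := (pvOrder_divisor_iff ((i : ZMod q.toNat)) n.toNat hroot).mpr ?_
    · exact hall j.toNat (by omega) (by omega)
    · intro J hJd hJ1 hJ2
      have hJdvd : ((J : Nat) : Int) ∣ n := by
        rw [← hnn]
        exact_mod_cast hJd
      have hBJ := hB ((J : Int)) ((pvDivs_char n _).mpr ⟨hJdvd, by omega, by omega⟩)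
      rw [pvPow_eq_one_iff _ _ _ hq2] at hBJ
      simpa using hBJ

theorem pvScan_eq (n q : Int) (hpre : 0 ≤ n ∨ q ≤ 2) (i : Int) (hi : 2 ≤ i) :
    pvScanA n q i = pvScanB n q (pvDivLoop n 1 []) i := by
  revert hi
  induction i using pvScanA.induct (n := n) (q := q) with
  | case1 i h hcond =>
    intro hi
    have hq3 : (3 : Int) ≤ q := by omega
    have hn : 0 ≤ n := hpre.resolve_right (by omega)
    rw [pvScanA, dif_pos h, if_pos hcond, pvScanB, dif_pos h,
      if_pos (by rw [← pvPred_eq n q i hn hq3]; exact hcond)]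
  | case2 i h hcond IH =>
    intro hi
    have hq3 : (3 : Int) ≤ q := by omega
    have hn : 0 ≤ n := hpre.resolve_right (by omega)
    rw [pvScanA, dif_pos h, if_neg hcond, pvScanB, dif_pos h,
      if_neg (by rw [← pvPred_eq n q i hn hq3]; exact hcond), IH (by omega)]
  | case3 i h =>
    intro _
    rw [pvScanA, dif_neg h, pvScanB, dif_neg h]

-- ===== VERDICT (by name: the statement is the Claim_ definition above) =====
theorem primitiveRootOfUnity_spec : Claim_equal_primitiveRootOfUnity := by
  intro n q _ hpre
  unfold Spec_primitiveRootOfUnity primitiveRootOfUnity primitiveRootOfUnity_alt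
  exact pvScan_eq n q hpre 2 (by omega)
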